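-- pv_equiv track=rewrite | github.com/ThuyPT90/UB_Nitrate | backend/Nitrate/src/tcms/plugins_support/auto_bug_plugin.py | extract_summary_expected
-- ===== SOURCE A (Python) =====
-- def extract_summary_expected(comment_text):
--     summary = ""
--     expected = ""
--     for line in comment_text.splitlines():
--         line = line.strip()
--         if line.lower().startswith("summary:"):
--             summary = line[8:].strip()
--         elif line.lower().startswith("expected_result:"):
--             expected = line[16:].strip()
--     return summary, expected
-- ===== SOURCE B (Python) =====
-- def extract_summary_expected(comment_text):
--     summary = ""
--     expected = ""
--     have_summary = False
--     have_expected = False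
--     for raw in reversed(comment_text.splitlines()):
--         line = raw.strip()
--         low = line.lower()
--         if not have_summary and low.startswith("summary:"):
--             summary = line[8:].strip()
--             have_summary = True
--         elif not have_expected and low.startswith("expected_result:"):
--             expected = line[16:].strip()
--             have_expected = True
--         if have_summary and have_expected:
--             break
--     return summary, expected
-- ===== Notes on version B (the rewrite author's own statement) =====
-- stated objective: alternative
-- what changed: Scans the lines in reverse with found-flags and an early break (first match from the end = last occurrence), instead of a forward pass that overwrites state on every later match.
import Mathlib
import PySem

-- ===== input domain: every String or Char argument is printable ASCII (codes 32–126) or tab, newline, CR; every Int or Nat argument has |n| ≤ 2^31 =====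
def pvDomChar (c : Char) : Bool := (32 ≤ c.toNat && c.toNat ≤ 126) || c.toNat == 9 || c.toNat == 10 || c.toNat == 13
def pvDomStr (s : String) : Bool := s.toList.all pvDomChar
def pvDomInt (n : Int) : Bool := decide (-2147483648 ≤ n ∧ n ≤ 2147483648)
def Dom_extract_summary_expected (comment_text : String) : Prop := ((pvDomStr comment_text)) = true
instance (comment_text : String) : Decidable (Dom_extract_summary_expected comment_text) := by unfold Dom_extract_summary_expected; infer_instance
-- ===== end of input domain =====

-- B scans the lines in reverse with found-flags and an early break instead of A's
-- forward overwrite-on-every-match pass; same result, different decomposition.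

-- ===== PORT A =====
-- A's loop body
def esxStepA (st : String × String) (l : String) : String × String :=
  let line := PySem.Str.strip l
  if PySem.Str.startswith (PySem.Str.lower line) "summary:" then
    (PySem.Str.strip (PySem.Str.slice line (some 8) none), st.2)
  else if PySem.Str.startswith (PySem.Str.lower line) "expected_result:" then
    (st.1, PySem.Str.strip (PySem.Str.slice line (some 16) none))
  else st

def extract_summary_expected (comment_text : String) : String × String :=
  (PySem.Str.splitlines comment_text).foldl esxStepA ("", "")

-- ===== PORT B =====
-- B's reverse loop with the two found-flags and the early break
def esxGoB : List String → Bool → Bool → String → String → String × String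
  | [], _, _, s, e => (s, e)
  | raw :: rest, hs, he, s, e =>
    let line := PySem.Str.strip raw
    let low := PySem.Str.lower line
    match
      (if !hs && PySem.Str.startswith low "summary:" then
        (PySem.Str.strip (PySem.Str.slice line (some 8) none), e, true, he)
      else if !he && PySem.Str.startswith low "expected_result:" then
        (s, PySem.Str.strip (PySem.Str.slice line (some 16) none), hs, true)
      else (s, e, hs, he)) with
    | (s', e', hs', he') => if hs' && he' then (s', e') else esxGoB rest hs' he' s' e'

def extract_summary_expected_alt (comment_text : String) : String × String :=
  esxGoB (PySem.Str.splitlines comment_text).reverse false false "" ""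

-- ===== PRECONDITION & SPEC =====
def Spec_extract_summary_expected (comment_text : String) (out : String × String) : Prop := out = extract_summary_expected_alt comment_text
instance (comment_text : String) (out : String × String) : Decidable (Spec_extract_summary_expected comment_text out) := by unfold Spec_extract_summary_expected; infer_instance

-- ===== CLAIM (what is proved, stated in full; the proofs are below) =====
def Claim_equal_extract_summary_expected : Prop := ∀ (comment_text : String), Dom_extract_summary_expected comment_text → Spec_extract_summary_expected comment_text (extract_summary_expected comment_text)

-- ===== LEMMAS AND PROOFS =====

-- first summary match in the list (default s)
def esxG1 : List String → String → String
  | [], s => s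
  | raw :: rest, s =>
    let line := PySem.Str.strip raw
    if PySem.Str.startswith (PySem.Str.lower line) "summary:" then
      PySem.Str.strip (PySem.Str.slice line (some 8) none)
    else esxG1 rest s

-- first expected_result match in the list (default e)
def esxG2 : List String → String → String
  | [], e => e
  | raw :: rest, e =>
    let line := PySem.Str.strip raw
    if PySem.Str.startswith (PySem.Str.lower line) "expected_result:" then
      PySem.Str.strip (PySem.Str.slice line (some 16) none)
    else esxG2 rest e

-- the two prefixes cannot both match the same line
lemma esxExcl (l : String) (h : PySem.Str.startswith l "summary:" = true) :
    PySem.Str.startswith l "expected_result:" = false := by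
  by_contra hc
  rw [Bool.not_eq_false] at hc
  rw [PySem.Str.startswith, PySem.Chars.startswith_iff] at h hc
  obtain ⟨t1, h1⟩ := h
  obtain ⟨t2, h2⟩ := hc
  rw [← h1] at h2
  have := congrArg List.head? h2
  simp [show "expected_result:".toList = 'e'::"xpected_result:".toList from rfl,
        show "summary:".toList = 's'::"ummary:".toList from rfl] at this

-- B's reverse scan with flags computes the first match of each field (with defaults)
lemma esxGoB_eq (L : List String) : ∀ (hs he : Bool) (s e : String),
    esxGoB L hs he s e = ((if hs then s else esxG1 L s), (if he then e else esxG2 L e)) := by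
  induction L with
  | nil => intro hs he s e; simp [esxGoB, esxG1, esxG2]
  | cons raw rest ih =>
    intro hs he s e
    by_cases hS : PySem.Chars.startswith (PySem.Chars.lower (PySem.Chars.strip raw.toList))
        ['s','u','m','m','a','r','y',':'] = true
    · have hE : PySem.Chars.startswith (PySem.Chars.lower (PySem.Chars.strip raw.toList))
          ['e','x','p','e','c','t','e','d','_','r','e','s','u','l','t',':'] = false := by
        simpa using esxExcl (PySem.Str.lower (PySem.Str.strip raw)) (by simpa using hS)
      cases hs <;> cases he <;> simp [esxGoB, esxG1, esxG2, hS, hE, ih]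
    · by_cases hEm : PySem.Chars.startswith (PySem.Chars.lower (PySem.Chars.strip raw.toList))
          ['e','x','p','e','c','t','e','d','_','r','e','s','u','l','t',':'] = true
      · cases hs <;> cases he <;> simp [esxGoB, esxG1, esxG2, hS, hEm, ih]
      · cases hs <;> cases he <;> simp [esxGoB, esxG1, esxG2, hS, hEm, ih]

lemma esxG1_append (M : List String) (x : String) (s : String) :
    esxG1 (M ++ [x]) s
      = esxG1 M (if PySem.Str.startswith (PySem.Str.lower (PySem.Str.strip x)) "summary:" then
          PySem.Str.strip (PySem.Str.slice (PySem.Str.strip x) (some 8) none) else s) := by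
  induction M with
  | nil => simp [esxG1]
  | cons y M ih => simp [esxG1, ih]

lemma esxG2_append (M : List String) (x : String) (e : String) :
    esxG2 (M ++ [x]) e
      = esxG2 M (if PySem.Str.startswith (PySem.Str.lower (PySem.Str.strip x)) "expected_result:" then
          PySem.Str.strip (PySem.Str.slice (PySem.Str.strip x) (some 16) none) else e) := by
  induction M with
  | nil => simp [esxG2]
  | cons y M ih => simp [esxG2, ih]

-- A's loop body acts independently on the two components
lemma esxStepA_eq (st : String × String) (x : String) :
    esxStepA st x =
      ((if PySem.Str.startswith (PySem.Str.lower (PySem.Str.strip x)) "summary:" then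
          PySem.Str.strip (PySem.Str.slice (PySem.Str.strip x) (some 8) none) else st.1),
       (if PySem.Str.startswith (PySem.Str.lower (PySem.Str.strip x)) "expected_result:" then
          PySem.Str.strip (PySem.Str.slice (PySem.Str.strip x) (some 16) none) else st.2)) := by
  by_cases hS : PySem.Str.startswith (PySem.Str.lower (PySem.Str.strip x)) "summary:" = true
  · have hE := esxExcl _ hS
    simp only [esxStepA, hS, hE, Bool.false_eq_true, if_true, if_false]
  · rw [Bool.not_eq_true] at hS
    simp only [esxStepA, hS, Bool.false_eq_true, if_false]
    split <;> simp

-- A's forward fold keeps, for each field, the LAST match = the first match of the reversed list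
lemma esxFoldA_eq (L : List String) : ∀ (s e : String),
    L.foldl esxStepA (s, e) = (esxG1 L.reverse s, esxG2 L.reverse e) := by
  induction L with
  | nil => intro s e; simp [esxG1, esxG2]
  | cons x L ih =>
    intro s e
    rw [List.foldl_cons, List.reverse_cons, esxStepA_eq, ih, esxG1_append, esxG2_append]

-- ===== VERDICT (by name: the statement is the Claim_ definition above) =====
theorem extract_summary_expected_spec : Claim_equal_extract_summary_expected := by
  intro ct _
  show _ = _
  rw [extract_summary_expected, extract_summary_expected_alt, esxFoldA_eq, esxGoB_eq]
  simp
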